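-- pv_equiv track=rewrite | github.com/Unstructured-IO/unstructured | unstructured/partition/text.py | _split_in_half_at_breakpoint
-- ===== SOURCE A (Python) =====
-- from typing import IO, Any, Callable, List, Optional, Tuple
--
-- def _split_in_half_at_breakpoint(
--     content: str,
--     breakpoint: str = " ",
-- ) -> List[str]:
--     """Splits a segment of content at the breakpoint closest to the middle"""
--     mid = len(content) // 2
--     for i in range(len(content) // 2):
--         if content[mid + i] == breakpoint:
--             mid += i
--             break
--         elif content[mid - i] == breakpoint:
--             mid += -i
--             break
--
--     return [content[:mid].rstrip(), content[mid:].lstrip()]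
-- ===== SOURCE B (Python) =====
-- def _split_in_half_at_breakpoint(
--     content: str,
--     breakpoint: str = " ",
-- ):
--     """Splits a segment of content at the breakpoint closest to the middle."""
--     mid = len(content) // 2
--     half = len(content) // 2
--     # first matching distance to the right of mid (inclusive), then to the left
--     dr = next((i for i in range(half) if content[mid + i] == breakpoint), None)
--     dl = next((i for i in range(half) if content[mid - i] == breakpoint), None)
--     if dr is not None and dl is not None:
--         mid = mid + dr if dr <= dl else mid - dl
--     elif dr is not None:
--         mid = mid + dr
--     elif dl is not None:
--         mid = mid - dl
--     return [content[:mid].rstrip(), content[mid:].lstrip()]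
-- ===== Notes on version B (the rewrite author's own statement) =====
-- stated objective: alternative
-- what changed: A's single interleaved expanding scan with early break is replaced by two independent first-match distance searches (right of mid, left of mid) followed by an arithmetic selection with A's right-preferring tie-break.
import Mathlib
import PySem

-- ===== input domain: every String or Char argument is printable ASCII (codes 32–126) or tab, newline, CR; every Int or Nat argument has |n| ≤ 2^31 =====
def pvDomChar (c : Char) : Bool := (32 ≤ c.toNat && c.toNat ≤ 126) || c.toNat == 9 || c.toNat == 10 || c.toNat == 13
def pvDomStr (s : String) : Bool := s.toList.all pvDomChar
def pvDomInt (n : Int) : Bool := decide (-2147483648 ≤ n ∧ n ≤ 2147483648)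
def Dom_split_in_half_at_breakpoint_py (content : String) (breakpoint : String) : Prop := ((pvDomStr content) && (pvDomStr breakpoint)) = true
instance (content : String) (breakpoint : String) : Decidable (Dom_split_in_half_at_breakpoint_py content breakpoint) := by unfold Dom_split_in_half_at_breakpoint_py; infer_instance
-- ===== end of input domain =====

-- B replaces A's interleaved expanding scan by two independent first-match
-- searches (right and left of the middle) plus an arithmetic selection; same
-- cost, different decomposition.

-- ===== PORT A =====
-- the for-loop of A: over the remaining range, check right at distance i, then left, else continue
def pvALoop (cs : List Char) (bs : List Char) (mid : Int) : List Int → Int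
  | [] => mid
  | i :: is =>
    if (PySem.List.pyGet? cs (mid + i)).map (fun c => [c]) == some bs then mid + i
    else if (PySem.List.pyGet? cs (mid - i)).map (fun c => [c]) == some bs then mid - i
    else pvALoop cs bs mid is

def split_in_half_at_breakpoint_py (content : String) (breakpoint : String) : List String :=
  let mid : Int := PySem.Int.floordiv (PySem.Str.len content) 2
  let mid' := pvALoop content.toList breakpoint.toList mid
      (PySem.List.pyRange 0 (PySem.Int.floordiv (PySem.Str.len content) 2) 1)
  [PySem.Str.rstrip (PySem.Str.slice content none (some mid')),
   PySem.Str.lstrip (PySem.Str.slice content (some mid') none)]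

-- ===== PORT B =====
def split_in_half_at_breakpoint_py_alt (content : String) (breakpoint : String) : List String :=
  let mid : Int := PySem.Int.floordiv (PySem.Str.len content) 2
  let half : Int := PySem.Int.floordiv (PySem.Str.len content) 2
  -- next((i for i in range(half) if content[mid + i] == breakpoint), None)
  let dr := (PySem.List.pyRange 0 half 1).find?
      (fun i => (PySem.List.pyGet? content.toList (mid + i)).map (fun c => [c]) == some breakpoint.toList)
  let dl := (PySem.List.pyRange 0 half 1).find?
      (fun i => (PySem.List.pyGet? content.toList (mid - i)).map (fun c => [c]) == some breakpoint.toList)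
  let mid' : Int :=
    match dr, dl with
    | some a, some b => if a ≤ b then mid + a else mid - b
    | some a, none   => mid + a
    | none,   some b => mid - b
    | none,   none   => mid
  [PySem.Str.rstrip (PySem.Str.slice content none (some mid')),
   PySem.Str.lstrip (PySem.Str.slice content (some mid') none)]

-- ===== PRECONDITION & SPEC =====
def Spec_split_in_half_at_breakpoint_py (content : String) (breakpoint : String) (out : List String) : Prop := out = split_in_half_at_breakpoint_py_alt content breakpoint
instance (content : String) (breakpoint : String) (out : List String) : Decidable (Spec_split_in_half_at_breakpoint_py content breakpoint out) := by unfold Spec_split_in_half_at_breakpoint_py; infer_instance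

-- ===== CLAIM (what is proved, stated in full; the proofs are below) =====
def Claim_equal_split_in_half_at_breakpoint_py : Prop := ∀ (content : String) (breakpoint : String), Dom_split_in_half_at_breakpoint_py content breakpoint → Spec_split_in_half_at_breakpoint_py content breakpoint (split_in_half_at_breakpoint_py content breakpoint)

-- ===== LEMMAS AND PROOFS =====

-- A's interleaved scan equals B's two independent first-match searches plus selection,
-- on any strictly increasing list of candidate distances.
lemma pvALoop_eq_find (cs : List Char) (bs : List Char) (mid : Int) (is : List Int)
    (h : is.Pairwise (· < ·)) :
    pvALoop cs bs mid is =
      (match is.find? (fun i => (PySem.List.pyGet? cs (mid + i)).map (fun c => [c]) == some bs),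
             is.find? (fun i => (PySem.List.pyGet? cs (mid - i)).map (fun c => [c]) == some bs) with
       | some a, some b => if a ≤ b then mid + a else mid - b
       | some a, none   => mid + a
       | none,   some b => mid - b
       | none,   none   => mid) := by
  induction is with
  | nil => simp [pvALoop]
  | cons i is ih =>
    rcases List.pairwise_cons.mp h with ⟨hlt, htail⟩
    by_cases hr : ((PySem.List.pyGet? cs (mid + i)).map (fun c => [c]) == some bs) = true
    · rw [List.find?_cons_of_pos (p := fun j => (PySem.List.pyGet? cs (mid + j)).map (fun c => [c]) == some bs) hr]
      by_cases hl : ((PySem.List.pyGet? cs (mid - i)).map (fun c => [c]) == some bs) = true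
      · rw [List.find?_cons_of_pos (p := fun j => (PySem.List.pyGet? cs (mid - j)).map (fun c => [c]) == some bs) hl]
        simp [pvALoop, hr]
      · rw [List.find?_cons_of_neg (p := fun j => (PySem.List.pyGet? cs (mid - j)).map (fun c => [c]) == some bs) hl]
        cases hfl : is.find? (fun j => (PySem.List.pyGet? cs (mid - j)).map (fun c => [c]) == some bs) with
        | none => simp [pvALoop, hr]
        | some b =>
          have hb : b ∈ is := List.mem_of_find?_eq_some hfl
          have : i ≤ b := le_of_lt (hlt b hb)
          simp [pvALoop, hr, this]
    · rw [List.find?_cons_of_neg (p := fun j => (PySem.List.pyGet? cs (mid + j)).map (fun c => [c]) == some bs) hr]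
      by_cases hl : ((PySem.List.pyGet? cs (mid - i)).map (fun c => [c]) == some bs) = true
      · rw [List.find?_cons_of_pos (p := fun j => (PySem.List.pyGet? cs (mid - j)).map (fun c => [c]) == some bs) hl]
        cases hfr : is.find? (fun j => (PySem.List.pyGet? cs (mid + j)).map (fun c => [c]) == some bs) with
        | none => simp [pvALoop, hr, hl]
        | some a =>
          have ha : a ∈ is := List.mem_of_find?_eq_some hfr
          have : ¬ a ≤ i := not_le.mpr (hlt a ha)
          simp [pvALoop, hr, hl, this]
      · rw [List.find?_cons_of_neg (p := fun j => (PySem.List.pyGet? cs (mid - j)).map (fun c => [c]) == some bs) hl]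
        simpa [pvALoop, hr, hl] using ih htail

-- ===== VERDICT (by name: the statement is the Claim_ definition above) =====
theorem split_in_half_at_breakpoint_py_spec : Claim_equal_split_in_half_at_breakpoint_py := by
  intro content breakpoint _
  unfold Spec_split_in_half_at_breakpoint_py
  simp only [split_in_half_at_breakpoint_py, split_in_half_at_breakpoint_py_alt]
  rw [pvALoop_eq_find _ _ _ _ (PySem.List.pairwise_lt_pyRange_one 0 _)]
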